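-- pv_equiv track=rewrite | github.com/M-krizz/BlueprintGPT | ontology/ontology_bridge.py | get_zone_rules
-- ===== SOURCE A (Python) =====
-- def get_zone_rules(room_types=None):
--     """Return public / service / private zone mapping for room types.
--
--     Inference: rooms that appear as range of ``containsRoom`` from a
--     ``ResidentialBuilding`` and inherit from HabitableRoom are public/
--     service. This is a simplified procedural mapping pending richer OWL
--     annotations.
--
--     Returns dict {room_type: zone}.
--     """
--     zone_map = {
--         "LivingRoom":  "public",
--         "DrawingRoom": "public",
--         "Lobby":       "public",
--         "DiningRoom":  "public",
--         "Kitchen":     "service",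
--         "Laundry":     "service",
--         "Store":       "service",
--         "Storage":     "service",
--         "Bedroom":     "private",
--         "Bathroom":    "private",
--         "WC":          "private",
--         "DressingArea":"private",
--         "Study":       "private",
--         "PrayerRoom":  "private",
--         "Garage":      "service",
--         "Stairs":      "service",
--         "Staircase":   "service",
--         "Passage":     "service",
--         "Lawn":        "public",
--         "OpenSpace":   "public",
--         "Balcony":     "public",
--         "SideGarden":  "public",
--         "Backyard":    "public",
--     }
--
--     if room_types:
--         return {rt: zone_map.get(rt, "service") for rt in room_types}
--     return dict(zone_map)
-- ===== SOURCE B (Python) =====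
-- _ZONES = {
--     "public":  frozenset({"LivingRoom", "DrawingRoom", "Lobby", "DiningRoom",
--                           "Lawn", "OpenSpace", "Balcony", "SideGarden", "Backyard"}),
--     "private": frozenset({"Bedroom", "Bathroom", "WC", "DressingArea",
--                           "Study", "PrayerRoom"}),
-- }
--
-- _ALL_ROOMS = ("LivingRoom", "DrawingRoom", "Lobby", "DiningRoom", "Kitchen",
--               "Laundry", "Store", "Storage", "Bedroom", "Bathroom", "WC",
--               "DressingArea", "Study", "PrayerRoom", "Garage", "Stairs",
--               "Staircase", "Passage", "Lawn", "OpenSpace", "Balcony",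
--               "SideGarden", "Backyard")
--
--
-- def _zone_of(rt):
--     for zone, members in _ZONES.items():
--         if rt in members:
--             return zone
--     return "service"
--
--
-- def get_zone_rules(room_types=None):
--     if not room_types:
--         room_types = _ALL_ROOMS
--     return {rt: _zone_of(rt) for rt in room_types}
-- ===== Notes on version B (the rewrite author's own statement) =====
-- stated objective: idiomatic
-- what changed: B replaces A's flat room->zone dict and its .get lookup by grouped zone member-sets queried via membership (first group containing the room wins, default "service"), and builds the full mapping by classifying a canonical room list instead of copying the flat dict.
import Mathlib
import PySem

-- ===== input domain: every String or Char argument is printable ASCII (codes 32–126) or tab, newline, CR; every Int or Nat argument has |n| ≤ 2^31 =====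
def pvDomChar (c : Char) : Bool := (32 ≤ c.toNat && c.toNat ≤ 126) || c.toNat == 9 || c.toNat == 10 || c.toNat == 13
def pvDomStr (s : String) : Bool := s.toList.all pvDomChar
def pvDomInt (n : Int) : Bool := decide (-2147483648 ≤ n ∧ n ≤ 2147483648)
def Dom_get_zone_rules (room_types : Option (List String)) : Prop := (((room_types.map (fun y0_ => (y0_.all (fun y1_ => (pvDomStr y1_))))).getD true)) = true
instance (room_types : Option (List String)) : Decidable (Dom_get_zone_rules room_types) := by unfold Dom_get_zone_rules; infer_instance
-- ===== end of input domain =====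

-- B replaces the flat room→zone dict and its .get lookup by grouped zone sets
-- queried via membership (first matching group wins, default "service"); same values (objective: idiomatic).

-- ===== PORT A =====
def pvZoneMap : PySem.Dict String String := PySem.Dict.mk
  [("LivingRoom", "public"), ("DrawingRoom", "public"), ("Lobby", "public"),
   ("DiningRoom", "public"), ("Kitchen", "service"), ("Laundry", "service"),
   ("Store", "service"), ("Storage", "service"), ("Bedroom", "private"),
   ("Bathroom", "private"), ("WC", "private"), ("DressingArea", "private"),
   ("Study", "private"), ("PrayerRoom", "private"), ("Garage", "service"),
   ("Stairs", "service"), ("Staircase", "service"), ("Passage", "service"),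
   ("Lawn", "public"), ("OpenSpace", "public"), ("Balcony", "public"),
   ("SideGarden", "public"), ("Backyard", "public")]

def get_zone_rules (room_types : Option (List String)) : List (String × String) :=
  match room_types with
  | some l =>
      if l ≠ [] then
        (l.foldl (fun d rt => d.insert rt (pvZoneMap.getD rt "service")) PySem.Dict.empty).items
      else pvZoneMap.items
  | none => pvZoneMap.items

-- ===== PORT B =====
def pvZones : List (String × List String) :=
  [("public",  ["LivingRoom", "DrawingRoom", "Lobby", "DiningRoom",
                "Lawn", "OpenSpace", "Balcony", "SideGarden", "Backyard"]),
   ("private", ["Bedroom", "Bathroom", "WC", "DressingArea", "Study", "PrayerRoom"])]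

def pvAllRooms : List String :=
  ["LivingRoom", "DrawingRoom", "Lobby", "DiningRoom", "Kitchen",
   "Laundry", "Store", "Storage", "Bedroom", "Bathroom", "WC",
   "DressingArea", "Study", "PrayerRoom", "Garage", "Stairs",
   "Staircase", "Passage", "Lawn", "OpenSpace", "Balcony",
   "SideGarden", "Backyard"]

-- first zone whose member set contains rt, else "service"
def pvZoneOf (rt : String) : String :=
  match pvZones.find? (fun p => p.2.contains rt) with
  | some p => p.1
  | none => "service"

def get_zone_rules_alt (room_types : Option (List String)) : List (String × String) :=
  let rooms : List String :=
    match room_types with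
    | some l => if l ≠ [] then l else pvAllRooms
    | none => pvAllRooms
  (rooms.foldl (fun d rt => d.insert rt (pvZoneOf rt)) PySem.Dict.empty).items

-- ===== PRECONDITION & SPEC =====
def Spec_get_zone_rules (room_types : Option (List String)) (out : List (String × String)) : Prop := out = get_zone_rules_alt room_types
instance (room_types : Option (List String)) (out : List (String × String)) : Decidable (Spec_get_zone_rules room_types out) := by unfold Spec_get_zone_rules; infer_instance

-- ===== CLAIM (what is proved, stated in full; the proofs are below) =====
def Claim_equal_get_zone_rules : Prop := ∀ (room_types : Option (List String)), Dom_get_zone_rules room_types → Spec_get_zone_rules room_types (get_zone_rules room_types)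

-- ===== LEMMAS AND PROOFS =====

-- A's flat-dict lookup and B's group-membership scan classify every string alike
set_option maxHeartbeats 2000000 in
theorem pv_zone_eq (rt : String) : pvZoneMap.getD rt "service" = pvZoneOf rt := by
  by_cases h0 : rt = "LivingRoom"
  · subst h0; decide
  by_cases h1 : rt = "DrawingRoom"
  · subst h1; decide
  by_cases h2 : rt = "Lobby"
  · subst h2; decide
  by_cases h3 : rt = "DiningRoom"
  · subst h3; decide
  by_cases h4 : rt = "Kitchen"
  · subst h4; decide
  by_cases h5 : rt = "Laundry"
  · subst h5; decide
  by_cases h6 : rt = "Store"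
  · subst h6; decide
  by_cases h7 : rt = "Storage"
  · subst h7; decide
  by_cases h8 : rt = "Bedroom"
  · subst h8; decide
  by_cases h9 : rt = "Bathroom"
  · subst h9; decide
  by_cases h10 : rt = "WC"
  · subst h10; decide
  by_cases h11 : rt = "DressingArea"
  · subst h11; decide
  by_cases h12 : rt = "Study"
  · subst h12; decide
  by_cases h13 : rt = "PrayerRoom"
  · subst h13; decide
  by_cases h14 : rt = "Garage"
  · subst h14; decide
  by_cases h15 : rt = "Stairs"
  · subst h15; decide
  by_cases h16 : rt = "Staircase"
  · subst h16; decide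
  by_cases h17 : rt = "Passage"
  · subst h17; decide
  by_cases h18 : rt = "Lawn"
  · subst h18; decide
  by_cases h19 : rt = "OpenSpace"
  · subst h19; decide
  by_cases h20 : rt = "Balcony"
  · subst h20; decide
  by_cases h21 : rt = "SideGarden"
  · subst h21; decide
  by_cases h22 : rt = "Backyard"
  · subst h22; decide
  simp only [pvZoneMap, pvZoneOf, pvZones, PySem.Dict.getD_eq_get?_getD,
    PySem.Dict.get?_mk_cons, List.find?, List.contains, List.elem,
    beq_eq_false_iff_ne.mpr h0, beq_eq_false_iff_ne.mpr (Ne.symm h0),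
    beq_eq_false_iff_ne.mpr h1, beq_eq_false_iff_ne.mpr (Ne.symm h1),
    beq_eq_false_iff_ne.mpr h2, beq_eq_false_iff_ne.mpr (Ne.symm h2),
    beq_eq_false_iff_ne.mpr h3, beq_eq_false_iff_ne.mpr (Ne.symm h3),
    beq_eq_false_iff_ne.mpr (Ne.symm h4),
    beq_eq_false_iff_ne.mpr (Ne.symm h5),
    beq_eq_false_iff_ne.mpr (Ne.symm h6),
    beq_eq_false_iff_ne.mpr (Ne.symm h7),
    beq_eq_false_iff_ne.mpr h8, beq_eq_false_iff_ne.mpr (Ne.symm h8),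
    beq_eq_false_iff_ne.mpr h9, beq_eq_false_iff_ne.mpr (Ne.symm h9),
    beq_eq_false_iff_ne.mpr h10, beq_eq_false_iff_ne.mpr (Ne.symm h10),
    beq_eq_false_iff_ne.mpr h11, beq_eq_false_iff_ne.mpr (Ne.symm h11),
    beq_eq_false_iff_ne.mpr h12, beq_eq_false_iff_ne.mpr (Ne.symm h12),
    beq_eq_false_iff_ne.mpr h13, beq_eq_false_iff_ne.mpr (Ne.symm h13),
    beq_eq_false_iff_ne.mpr (Ne.symm h14),
    beq_eq_false_iff_ne.mpr (Ne.symm h15),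
    beq_eq_false_iff_ne.mpr (Ne.symm h16),
    beq_eq_false_iff_ne.mpr (Ne.symm h17),
    beq_eq_false_iff_ne.mpr h18, beq_eq_false_iff_ne.mpr (Ne.symm h18),
    beq_eq_false_iff_ne.mpr h19, beq_eq_false_iff_ne.mpr (Ne.symm h19),
    beq_eq_false_iff_ne.mpr h20, beq_eq_false_iff_ne.mpr (Ne.symm h20),
    beq_eq_false_iff_ne.mpr h21, beq_eq_false_iff_ne.mpr (Ne.symm h21),
    beq_eq_false_iff_ne.mpr h22, beq_eq_false_iff_ne.mpr (Ne.symm h22)]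
  rfl

theorem pv_foldl_congr (l : List String) (d : PySem.Dict String String) :
    l.foldl (fun d rt => d.insert rt (pvZoneMap.getD rt "service")) d
      = l.foldl (fun d rt => d.insert rt (pvZoneOf rt)) d := by
  induction l generalizing d with
  | nil => rfl
  | cons x xs ih => simp only [List.foldl_cons, pv_zone_eq]

theorem pv_full_map :
    pvZoneMap.items
      = (pvAllRooms.foldl (fun d rt => d.insert rt (pvZoneOf rt)) PySem.Dict.empty).items := by
  decide

-- ===== VERDICT (by name: the statement is the Claim_ definition above) =====
theorem get_zone_rules_spec : Claim_equal_get_zone_rules := by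
  intro room_types _
  unfold Spec_get_zone_rules get_zone_rules get_zone_rules_alt
  match room_types with
  | none => exact pv_full_map
  | some l =>
      by_cases h : l = []
      · subst h; simp [pv_full_map]
      · simp only [h, ne_eq, not_false_eq_true, if_pos, pv_foldl_congr]
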